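-- pv_equiv track=rewrite | github.com/jhoshiko/College-Work | Spring 2019/Software Tools and Dev/CS3250SpringH2KTB/pyjvm/util.py | desc_nargs
-- ===== SOURCE A (Python) =====
-- def desc_nargs(desc):
--     """
--     Examines utf8 constants for specific notations.
--
--     :param desc:    String of characters.
--     :return i:      Number of characters in desc.
--     """
--     args = desc.split(')', 2)[0][1:]
--     i = 0
--     L = False
--     for c in args:
--         if c == '[':
--             continue
--         if L:
--             if c == ';':
--                 L = False
--             continue
--         if c == 'L':
--             L = True
--         i += 1
--     return i
-- ===== SOURCE B (Python) =====
-- def desc_nargs(desc):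
--     s = desc.split(')', 2)[0][1:].replace('[', '')
--     total = 0
--     head, sep, tail = s.partition('L')
--     while sep:
--         total += len(head) + 1
--         head, sep, tail = tail.partition(';')[2].partition('L')
--     return total + len(head)
-- ===== Notes on version B (the rewrite author's own statement) =====
-- stated objective: faster
-- what changed: Replaced the per-character boolean-flag state machine by a staged chunk decomposition: first strip all array markers with str.replace, then repeatedly cut the string at the next object-type marker with str.partition, counting whole base-type chunks by len() and skipping each object name by partitioning at its terminator, so no character is ever inspected in Python-level code.
import Mathlib
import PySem

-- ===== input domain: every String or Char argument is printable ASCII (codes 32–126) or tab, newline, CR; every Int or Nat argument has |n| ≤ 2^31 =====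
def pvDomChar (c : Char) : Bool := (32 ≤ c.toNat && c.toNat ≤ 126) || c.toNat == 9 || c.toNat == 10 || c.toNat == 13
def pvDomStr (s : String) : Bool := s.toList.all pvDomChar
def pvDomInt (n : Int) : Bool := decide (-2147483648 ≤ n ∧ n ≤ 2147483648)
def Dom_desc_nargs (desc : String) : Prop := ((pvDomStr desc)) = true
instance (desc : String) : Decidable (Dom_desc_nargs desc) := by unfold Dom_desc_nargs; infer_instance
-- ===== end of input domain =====

-- B replaces A's per-character flag state machine by a staged chunk decomposition (replace, then
-- repeated partition, counting whole chunks by len); a timing run measured B faster (constant factor).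

-- ===== PORT A =====
-- desc.split(')', 2)[0][1:]; split never returns an empty list, so [0] is headD.
def pvArgs (desc : String) : List Char :=
  PySem.List.slice ((PySem.Chars.splitOnMax desc.toList [')'] 2).headD []) (some 1) none

def pvAStep (st : Int × Bool) (c : Char) : Int × Bool :=
  if c = '[' then st
  else if st.2 then (if c = ';' then (st.1, false) else st)
  else if c = 'L' then (st.1 + 1, true)
  else (st.1 + 1, false)

def desc_nargs (desc : String) : Int :=
  ((pvArgs desc).foldl pvAStep (0, false)).1

-- ===== PORT B =====
-- s.partition(c): (part before first c, whether c occurs, part after it); exact port of str.partition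
-- restricted to the single-character separators Source B uses.
def pvPartition (sep : Char) : List Char → List Char × Bool × List Char
  | [] => ([], false, [])
  | c :: rest =>
    if c = sep then ([], true, rest)
    else
      let (h, f, t) := pvPartition sep rest
      (c :: h, f, t)

theorem pvPartition_tail_le (sep : Char) (s : List Char) :
    (pvPartition sep s).2.2.length ≤ s.length := by
  induction s with
  | nil => simp [pvPartition]
  | cons c rest ih =>
    simp only [pvPartition]
    split
    · simp
    · simpa using Nat.le_succ_of_le ih

theorem pvPartition_tail_lt (sep : Char) (s : List Char)
    (h : (pvPartition sep s).2.1 = true) : (pvPartition sep s).2.2.length < s.length := by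
  induction s with
  | nil => simp [pvPartition] at h
  | cons c rest ih =>
    by_cases hc : c = sep
    · simp only [pvPartition, if_pos hc]
      exact Nat.lt_succ_self _
    · simp only [pvPartition, if_neg hc] at h ⊢
      exact Nat.lt_succ_of_lt (ih h)

-- the while loop of Source B: per iteration one whole chunk is consumed
def pvBLoop (total : Int) (s : List Char) : Int :=
  let p := pvPartition 'L' s
  if h : p.2.1 then
    pvBLoop (total + p.1.length + 1) ((pvPartition ';' p.2.2).2.2)
  else
    total + p.1.length
termination_by s.length
decreasing_by
  exact Nat.lt_of_le_of_lt (pvPartition_tail_le ';' _) (pvPartition_tail_lt 'L' s h)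

def desc_nargs_alt (desc : String) : Int :=
  pvBLoop 0 (PySem.Chars.replace (pvArgs desc) ['['] [])

-- ===== PRECONDITION & SPEC =====
def Spec_desc_nargs (desc : String) (out : Int) : Prop := out = desc_nargs_alt desc
instance (desc : String) (out : Int) : Decidable (Spec_desc_nargs desc out) := by unfold Spec_desc_nargs; infer_instance

-- ===== CLAIM (what is proved, stated in full; the proofs are below) =====
def Claim_equal_desc_nargs : Prop := ∀ (desc : String), Dom_desc_nargs desc → Spec_desc_nargs desc (desc_nargs desc)

-- ===== LEMMAS AND PROOFS =====

-- replace(s, "[", "") removes exactly the '[' characters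
theorem pv_replace_go_filter (fuel : Nat) (l acc : List Char) (h : l.length ≤ fuel) :
    PySem.Chars.replace.go ['['] [] fuel l acc = acc.reverse ++ l.filter (· != '[') := by
  induction fuel generalizing l acc with
  | zero =>
    interval_cases hl : l.length
    · rw [List.length_eq_zero_iff] at hl
      subst hl; simp [PySem.Chars.replace.go]
  | succ n ih =>
    match l with
    | [] => simp [PySem.Chars.replace.go]
    | c :: t =>
      by_cases hc : c = '['
      · subst hc
        rw [PySem.Chars.replace.go]
        rw [if_pos (by simp [List.isPrefixOf])]
        simpa using ih t acc (by simpa using Nat.le_of_succ_le_succ h)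
      · have hc' : ¬('[' = c) := fun hh => hc hh.symm
        rw [PySem.Chars.replace.go]
        rw [if_neg (by simp [List.isPrefixOf, hc'])]
        rw [ih t (c :: acc) (by simpa using Nat.le_of_succ_le_succ h)]
        simp [hc]

theorem pv_replace_filter (s : List Char) :
    PySem.Chars.replace s ['['] [] = s.filter (· != '[') := by
  rw [PySem.Chars.replace, if_neg (by simp)]
  exact pv_replace_go_filter s.length s [] le_rfl

-- A's step ignores '[' in either state, so A's count over s equals its count over s with '[' removed
theorem pv_foldl_filter (s : List Char) (st : Int × Bool) :
    s.foldl pvAStep st = (s.filter (· != '[')).foldl pvAStep st := by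
  induction s generalizing st with
  | nil => rfl
  | cons c t ih =>
    by_cases hc : c = '['
    · subst hc; simpa [pvAStep] using ih st
    · simp [hc, ih (pvAStep st c)]

-- in the L state A skips everything up to and including the first ';'
theorem pv_foldl_true (s : List Char) (i : Int) :
    (s.foldl pvAStep (i, true)).1 = (((pvPartition ';' s).2.2).foldl pvAStep (i, false)).1 := by
  induction s generalizing i with
  | nil => simp [pvPartition]
  | cons c t ih =>
    by_cases hb : c = '['
    · subst hb; simpa [pvAStep, pvPartition] using ih i
    · by_cases hs : c = ';'
      · subst hs; simp [pvAStep, pvPartition]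
      · simp only [pvPartition, if_neg hs]
        simpa [pvAStep, hb, hs] using ih i

-- over 'L'-free, '['-free chunks A just counts the characters
theorem pv_foldl_plain (s : List Char) (i : Int) (hL : 'L' ∉ s) (hB : '[' ∉ s) :
    s.foldl pvAStep (i, false) = (i + s.length, false) := by
  induction s generalizing i with
  | nil => simp
  | cons c t ih =>
    simp only [List.mem_cons, not_or] at hL hB
    have hb : c ≠ '[' := fun hh => hB.1 hh.symm
    have hl : c ≠ 'L' := fun hh => hL.1 hh.symm
    simp only [List.foldl_cons, pvAStep, if_neg hb, Bool.false_eq_true, if_false, if_neg hl]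
    rw [ih (i + 1) hL.2 hB.2]
    simp only [List.length_cons]
    congr 1
    push_cast
    ring

-- pvPartition decomposes the list at the first occurrence of sep
theorem pvPartition_spec (sep : Char) (s : List Char) :
    ((pvPartition sep s).2.1 = true →
      s = (pvPartition sep s).1 ++ sep :: (pvPartition sep s).2.2 ∧ sep ∉ (pvPartition sep s).1) ∧
    ((pvPartition sep s).2.1 = false → (pvPartition sep s).1 = s ∧ sep ∉ s) := by
  induction s with
  | nil => simp [pvPartition]
  | cons c t ih =>
    by_cases hc : c = sep
    · subst hc; simp [pvPartition]
    · simp only [pvPartition, if_neg hc]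
      constructor
      · intro h
        have := ih.1 (by simpa using h)
        constructor
        · conv_lhs => rw [this.1]
          simp
        · simpa [Ne.symm, hc] using this.2
      · intro h
        have := ih.2 (by simpa using h)
        simp [this.1, Ne.symm, hc, this.2]

-- subset: the part after the first ';' consists of characters of s
theorem pvPartition_tail_subset (sep : Char) (s : List Char) {x : Char}
    (hx : x ∈ (pvPartition sep s).2.2) : x ∈ s := by
  induction s with
  | nil => simp [pvPartition] at hx
  | cons c t ih =>
    by_cases hc : c = sep
    · simp only [pvPartition, if_pos hc] at hx
      exact List.mem_cons_of_mem _ hx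
    · simp only [pvPartition, if_neg hc] at hx
      exact List.mem_cons_of_mem _ (ih hx)

-- main correspondence: A's flag loop on a '['-free list equals B's chunk loop
theorem pv_main (n : Nat) (s : List Char) (i : Int) (hn : s.length ≤ n) (hB : '[' ∉ s) :
    (s.foldl pvAStep (i, false)).1 = pvBLoop i s := by
  induction n generalizing s i with
  | zero =>
    have : s = [] := by
      cases s with
      | nil => rfl
      | cons a t => simp at hn
    subst this; simp [pvBLoop, pvPartition]
  | succ n ih =>
    rw [pvBLoop]
    by_cases h : (pvPartition 'L' s).2.1 = true
    · obtain ⟨hdec, hLhead⟩ := (pvPartition_spec 'L' s).1 h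
      simp only [h, dif_pos]
      set head := (pvPartition 'L' s).1 with hh
      set tail := (pvPartition 'L' s).2.2 with ht
      have hBhead : '[' ∉ head := fun hm => hB (by rw [hdec]; simp [hm])
      have hstep : pvAStep (i + (head.length : Int), false) 'L' = (i + head.length + 1, true) := by
        simp [pvAStep]
      conv_lhs => rw [hdec]
      rw [List.foldl_append, pv_foldl_plain head i hLhead hBhead, List.foldl_cons, hstep]
      rw [pv_foldl_true]
      apply ih
      · have h1 : (pvPartition ';' tail).2.2.length ≤ tail.length := pvPartition_tail_le ';' tail
        have h2 : s.length = head.length + 1 + tail.length := by rw [hdec]; simp; omega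
        omega
      · intro hm
        exact hB (by rw [hdec]; simp [pvPartition_tail_subset ';' tail hm])
    · obtain ⟨hhead, hLs⟩ := (pvPartition_spec 'L' s).2 (by simpa using h)
      simp only [h, dif_neg, Bool.false_eq_true, not_false_iff]
      rw [pv_foldl_plain s i hLs hB, hhead]

-- ===== VERDICT (by name: the statement is the Claim_ definition above) =====
theorem desc_nargs_spec : Claim_equal_desc_nargs := by
  intro desc _
  unfold Spec_desc_nargs desc_nargs desc_nargs_alt
  rw [pv_replace_filter, pv_foldl_filter]
  exact pv_main _ _ 0 le_rfl (by simp)
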